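-- pv_equiv track=rewrite | github.com/JesseZhuang/InCodeLearning-Python3 | algorithm/hash/max_tower_total_height.py | maximumTotalSum2
-- ===== SOURCE A (Python) =====
-- from collections import Counter, defaultdict
--
-- def maximumTotalSum2(maximumHeight):
--     """n,m+n. two passes n"""
--     counts = defaultdict(int)
--     mem = dict()
--     for h in maximumHeight:
--         counts[h] += 1
--         if h not in mem:
--             mem[h] = h - 1
--         else:
--             while mem[h] in mem:
--                 mem[h] -= 1
--                 if mem[h] == 0: return -1
--     res = 0
--     for h, cnt in counts.items():
--         res += h
--         while cnt > 1:
--             nh = mem[h]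
--             while nh in mem: nh -= 1
--             if nh == 0: return -1
--             res += nh
--             mem[h] = mem[nh] = nh - 1
--             cnt -= 1
--     return res
-- ===== SOURCE B (Python) =====
-- def maximumTotalSum2(maximumHeight):
--     res = 0
--     prev = None
--     for cap in sorted(maximumHeight, reverse=True):
--         cur = cap if prev is None else min(cap, prev - 1)
--         if cur == 0:
--             return -1
--         res += cur
--         prev = cur
--     return res
-- ===== Notes on version B (the rewrite author's own statement) =====
-- stated objective: simpler
-- what changed: A's two-pass hash scheme (a counts dict plus a 'mem' dict of per-height pointers chained downward to find free slots) is replaced by a single greedy pass over a descending-sorted copy: cur = min(cap, prev-1), returning -1 when a height hits 0.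
-- outside the precondition, e.g. on maximumTotalSum2([0]): A returns 0, B returns -1; on maximumTotalSum2([1, 1, 0]): A returns 0, B returns -1
import Mathlib
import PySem

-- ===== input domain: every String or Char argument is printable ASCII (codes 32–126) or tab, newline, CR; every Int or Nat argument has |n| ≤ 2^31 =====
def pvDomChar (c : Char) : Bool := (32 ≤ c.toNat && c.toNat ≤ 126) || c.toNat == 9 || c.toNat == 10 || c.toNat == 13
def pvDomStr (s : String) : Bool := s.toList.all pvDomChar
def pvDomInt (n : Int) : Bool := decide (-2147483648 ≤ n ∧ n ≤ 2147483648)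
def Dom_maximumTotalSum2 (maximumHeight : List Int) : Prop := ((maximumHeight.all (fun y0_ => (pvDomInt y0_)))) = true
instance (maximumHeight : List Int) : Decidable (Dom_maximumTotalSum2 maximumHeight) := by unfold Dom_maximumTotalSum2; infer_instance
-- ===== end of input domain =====

-- B replaces A's two-pass hash/pointer slot-chaining with one sorted descending greedy pass (objective: simpler).

-- ===== PORT A =====

-- termination helper for the pointer-descent loops (cited by the ports' decreasing_by)
theorem pvFilterMono (l : List Int) {p q : Int → Bool} (h : ∀ x, p x = true → q x = true) :
    (l.filter p).length ≤ (l.filter q).length := by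
  induction l with
  | nil => simp
  | cons x t ih =>
    have hle := ih
    cases hp : p x <;> cases hq : q x
    · simp only [List.filter_cons, hp, hq, Bool.false_eq_true, if_false]; exact hle
    · simp only [List.filter_cons, hp, hq, Bool.false_eq_true, if_false, if_true, List.length_cons]; omega
    · exact absurd (h x hp) (by simp [hq])
    · simp only [List.filter_cons, hp, hq, if_true, List.length_cons]; omega

theorem pvFilterLt {l : List Int} {v : Int} (hv : v ∈ l) :
    (l.filter (fun k => decide (k ≤ v - 1))).length < (l.filter (fun k => decide (k ≤ v))).length := by
  induction l with
  | nil => cases hv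
  | cons x t ih =>
    have hmono : (t.filter (fun k => decide (k ≤ v - 1))).length ≤
        (t.filter (fun k => decide (k ≤ v))).length :=
      pvFilterMono t (fun x hx => by simp at hx ⊢; omega)
    simp only [List.filter_cons]
    rcases List.mem_cons.mp hv with h | h
    · subst h
      have h1 : (decide (v ≤ v - 1)) = false := by simp
      have h2 : (decide (v ≤ v)) = true := by simp
      simp only [h1, h2, Bool.false_eq_true, if_false, if_true, List.length_cons]
      omega
    · have := ih h
      by_cases hx : x ≤ v - 1
      · have hx2 : x ≤ v := by omega
        have e1 : (decide (x ≤ v - 1)) = true := by simpa using hx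
        have e2 : (decide (x ≤ v)) = true := by simpa using hx2
        rw [e1, e2]; simp only [if_true, List.length_cons]; omega
      · have e1 : (decide (x ≤ v - 1)) = false := by simpa using hx
        by_cases hx2 : x ≤ v
        · have e2 : (decide (x ≤ v)) = true := by simpa using hx2
          rw [e1, e2]; simp only [Bool.false_eq_true, if_false, if_true, List.length_cons]; omega
        · have e2 : (decide (x ≤ v)) = false := by simpa using hx2
          rw [e1, e2]; simp only [Bool.false_eq_true, if_false]; omega

-- Python: `while mem[h] in mem: mem[h] -= 1; if mem[h] == 0: return -1`.
-- The running value of mem[h] is held in the local v (the loop never changes the key set,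
-- so the membership test `mem[h] in mem` is unaffected); the caller writes the final value back.
def pass1Skip (mem : PySem.Dict Int Int) (v : Int) : Option Int :=
  if h : mem.contains v then
    (if v - 1 = 0 then none else pass1Skip mem (v - 1))
  else some v
termination_by (mem.keys.filter (fun k => decide (k ≤ v))).length
decreasing_by
  exact pvFilterLt ((PySem.Dict.contains_iff_mem_keys _ _).mp h)

-- first pass of A: builds counts (`counts[h] += 1`) and mem; `none` = `return -1`
def pass1 (t : List Int) (counts mem : PySem.Dict Int Int) :
    Option (PySem.Dict Int Int × PySem.Dict Int Int) :=
  match t with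
  | [] => some (counts, mem)
  | h :: rest =>
    let counts' := counts.modify h 0 (· + 1)
    if mem.contains h then
      match pass1Skip mem (mem.getD h 0) with
      | none => none
      | some v => pass1 rest counts' (mem.insert h v)
    else pass1 rest counts' (mem.insert h (h - 1))

-- Python: `while nh in mem: nh -= 1`
def pass2Skip (mem : PySem.Dict Int Int) (v : Int) : Int :=
  if h : mem.contains v then pass2Skip mem (v - 1) else v
termination_by (mem.keys.filter (fun k => decide (k ≤ v))).length
decreasing_by
  exact pvFilterLt ((PySem.Dict.contains_iff_mem_keys _ _).mp h)

-- Python: `while cnt > 1: nh = mem[h]; while nh in mem: nh -= 1; if nh == 0: return -1; ...`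
def pass2Chain (mem : PySem.Dict Int Int) (h : Int) (cnt : Int) (res : Int) :
    Option (PySem.Dict Int Int × Int) :=
  if hc : 1 < cnt then
    let nh := pass2Skip mem (mem.getD h 0)
    if nh = 0 then none
    else pass2Chain ((mem.insert h (nh - 1)).insert nh (nh - 1)) h (cnt - 1) (res + nh)
  else some (mem, res)
termination_by cnt.toNat
decreasing_by omega

-- second pass of A: `for h, cnt in counts.items(): res += h; while cnt > 1: ...`
def pass2 (its : List (Int × Int)) (mem : PySem.Dict Int Int) (res : Int) : Option Int :=
  match its with
  | [] => some res
  | (h, cnt) :: rest =>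
    match pass2Chain mem h cnt (res + h) with
    | none => none
    | some (mem', res') => pass2 rest mem' res'

def maximumTotalSum2 (maximumHeight : List Int) : Int :=
  match pass1 maximumHeight PySem.Dict.empty PySem.Dict.empty with
  | none => -1
  | some (counts, mem) =>
    match pass2 counts.items mem 0 with
    | none => -1
    | some r => r

-- ===== PORT B =====

def altGo (l : List Int) (res : Int) (prev : Option Int) : Int :=
  match l with
  | [] => res
  | cap :: t =>
    let cur := match prev with
      | none => cap
      | some p => min cap (p - 1)
    if cur = 0 then -1 else altGo t (res + cur) (some cur)

def maximumTotalSum2_alt (maximumHeight : List Int) : Int :=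
  altGo (PySem.List.sorted maximumHeight (fun x => x) true) 0 none

-- ===== PRECONDITION & SPEC =====

-- Pre_ excludes lists containing the height 0: 0 is A's failure sentinel, and once 0 is itself a
-- dict key A's zero-checks can be bypassed (its chains walk past 0 and count negative "heights",
-- e.g. A [1,1,0] = 0 via heights 1, -1, 0) — an accident of the sentinel encoding on inputs outside
-- the problem's positive-height domain; B reports -1 there.
def Pre_maximumTotalSum2 (maximumHeight : List Int) : Prop := (0 : Int) ∉ maximumHeight
instance (maximumHeight : List Int) : Decidable (Pre_maximumTotalSum2 maximumHeight) := by
  unfold Pre_maximumTotalSum2; infer_instance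

def pvWitness_maximumTotalSum2 : List Int := [5, 5, 3]

def Spec_maximumTotalSum2 (maximumHeight : List Int) (out : Int) : Prop :=
  out = maximumTotalSum2_alt maximumHeight
instance (maximumHeight : List Int) (out : Int) : Decidable (Spec_maximumTotalSum2 maximumHeight out) := by
  unfold Spec_maximumTotalSum2; infer_instance

-- ===== CLAIM (what is proved, stated in full; the proofs are below) =====
def Claim_equal_maximumTotalSum2 : Prop :=
  ∀ (maximumHeight : List Int), Dom_maximumTotalSum2 maximumHeight →
    Pre_maximumTotalSum2 maximumHeight →
    Spec_maximumTotalSum2 maximumHeight (maximumTotalSum2 maximumHeight)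

-- ===== LEMMAS AND PROOFS =====

-- The abstract greedy model: occupied slots as a Finset; each cap takes the largest
-- slot ≤ cap not yet occupied; taking slot 0 fails. Both ports are simulated against it,
-- A in the order "distinct caps first, then duplicates", B in sorted descending order;
-- the model is permutation-invariant (diamond lemma), which closes the equivalence.

def pvFF (occ : Finset Int) (v : Int) : Int :=
  if h : v ∈ occ then pvFF occ (v - 1) else v
termination_by (occ.filter (fun k => k ≤ v)).card
decreasing_by
  apply Finset.card_lt_card
  constructor
  · intro x hx
    simp only [Finset.mem_filter] at hx ⊢
    exact ⟨hx.1, by omega⟩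
  · intro hsub
    have hv : v ∈ occ.filter (fun k => k ≤ v - 1) := hsub (by simp [h])
    rw [Finset.mem_filter] at hv
    omega

def pvStep (occ : Finset Int) (c : Int) : Option (Finset Int) :=
  let v := pvFF occ c
  if v = 0 then none else some (insert v occ)

def pvRun (l : List Int) (s : Option (Finset Int)) : Option (Finset Int) :=
  l.foldl (fun s c => s.bind (fun occ => pvStep occ c)) s

def pvOut (s : Option (Finset Int)) : Int :=
  match s with
  | none => -1
  | some occ => occ.sum id

theorem pvFF_notmem {occ : Finset Int} {v : Int} (h : v ∉ occ) : pvFF occ v = v := by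
  rw [pvFF]; simp [h]

theorem pvFF_mem {occ : Finset Int} {v : Int} (h : v ∈ occ) : pvFF occ v = pvFF occ (v - 1) := by
  rw [pvFF]; simp [h]

theorem pvFF_le (occ : Finset Int) (v : Int) : pvFF occ v ≤ v := by
  induction v using pvFF.induct occ with
  | case1 v h ih => rw [pvFF_mem h]; omega
  | case2 v h => rw [pvFF_notmem h]

theorem pvFF_fresh (occ : Finset Int) (v : Int) : pvFF occ v ∉ occ := by
  induction v using pvFF.induct occ with
  | case1 v h ih => rw [pvFF_mem h]; exact ih
  | case2 v h => rw [pvFF_notmem h]; exact h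

theorem pvFF_skipped (occ : Finset Int) (v : Int) :
    ∀ w, pvFF occ v < w → w ≤ v → w ∈ occ := by
  induction v using pvFF.induct occ with
  | case1 v h ih =>
    intro w h1 h2
    rw [pvFF_mem h] at h1
    rcases eq_or_lt_of_le h2 with rfl | hlt
    · exact h
    · exact ih w h1 (by omega)
  | case2 v h =>
    intro w h1 h2
    rw [pvFF_notmem h] at h1
    omega

theorem pvFF_congr_interval (occ : Finset Int) {v v' : Int} (hle : v' ≤ v)
    (hint : ∀ w, v' < w → w ≤ v → w ∈ occ) : pvFF occ v = pvFF occ v' := by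
  have hn : (v - v').toNat = (v - v').toNat := rfl
  generalize hk : (v - v').toNat = k at hn
  clear hn
  induction k generalizing v with
  | zero =>
    have : v = v' := by omega
    rw [this]
  | succ k ih =>
    have hv : v ∈ occ := hint v (by omega) le_rfl
    rw [pvFF_mem hv]
    exact ih (by omega) (fun w hw1 hw2 => hint w hw1 (by omega)) (by omega)

theorem pvFF_congr_le (occ : Finset Int) {a b : Int} (h1 : pvFF occ a ≤ b) (h2 : b ≤ a) :
    pvFF occ b = pvFF occ a := by
  rw [pvFF_congr_interval occ h2 (fun w hw1 hw2 => pvFF_skipped occ a w (by omega) hw2)]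

theorem pvFF_insert_gt (occ : Finset Int) {x c : Int} (h : c < x) :
    pvFF (insert x occ) c = pvFF occ c := by
  induction c using pvFF.induct occ with
  | case1 v hv ih =>
    rw [pvFF_mem hv, pvFF_mem (Finset.mem_insert_of_mem hv)]
    exact ih (by omega)
  | case2 v hv =>
    have : v ∉ insert x occ := by
      simp only [Finset.mem_insert]
      push_neg
      exact ⟨by omega, hv⟩
    rw [pvFF_notmem hv, pvFF_notmem this]

theorem pvFF_insert_lt (occ : Finset Int) {x c : Int} (h : x < pvFF occ c) :
    pvFF (insert x occ) c = pvFF occ c := by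
  induction c using pvFF.induct occ with
  | case1 v hv ih =>
    rw [pvFF_mem hv] at h
    rw [pvFF_mem hv, pvFF_mem (Finset.mem_insert_of_mem hv)]
    exact ih h
  | case2 v hv =>
    rw [pvFF_notmem hv] at h
    have : v ∉ insert x occ := by
      simp only [Finset.mem_insert]
      push_neg
      exact ⟨by omega, hv⟩
    rw [pvFF_notmem hv, pvFF_notmem this]

theorem pvFF_insert_half (occ : Finset Int) {x c : Int} (h : pvFF occ c = x) :
    pvFF (insert x occ) c = pvFF (insert x occ) (x - 1) := by
  induction c using pvFF.induct occ with
  | case1 v hv ih =>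
    rw [pvFF_mem hv] at h
    rw [pvFF_mem (Finset.mem_insert_of_mem hv)]
    exact ih h
  | case2 v hv =>
    rw [pvFF_notmem hv] at h
    subst h
    rw [pvFF_mem (Finset.mem_insert_self v occ)]

theorem pvFF_insert_eq (occ : Finset Int) {x c : Int} (h : pvFF occ c = x) :
    pvFF (insert x occ) c = pvFF occ (x - 1) := by
  rw [pvFF_insert_half occ h, pvFF_insert_gt occ (by omega)]

theorem pvFF_zero (occ : Finset Int) (v : Int) (hv : 0 ≤ v)
    (hall : ∀ w, 1 ≤ w → w ≤ v → w ∈ occ) (h0 : (0 : Int) ∉ occ) : pvFF occ v = 0 := by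
  have := pvFF_congr_interval occ (v' := 0) (by omega)
    (fun w hw1 hw2 => hall w (by omega) hw2)
  rw [this, pvFF_notmem h0]

-- the diamond: two consecutive model steps commute
theorem pvDiamondLe (occ : Finset Int) {a b : Int} (hba : b ≤ a) :
    ((pvStep occ a).bind (fun o => pvStep o b)) = ((pvStep occ b).bind (fun o => pvStep o a)) := by
  by_cases hcase : b < pvFF occ a
  · have hvb' : pvFF (insert (pvFF occ a) occ) b = pvFF occ b :=
      pvFF_insert_gt occ hcase
    have hva' : pvFF (insert (pvFF occ b) occ) a = pvFF occ a :=
      pvFF_insert_lt occ (lt_of_le_of_lt (pvFF_le occ b) hcase)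
    by_cases hva0 : pvFF occ a = 0 <;> by_cases hvb0 : pvFF occ b = 0 <;>
      simp [pvStep, hvb', hva', hva0, hvb0, Option.bind]
    exact Finset.insert_comm _ _ _
  · have hvv : pvFF occ b = pvFF occ a := pvFF_congr_le occ ((not_lt.mp hcase)) hba
    have h2a : pvFF (insert (pvFF occ a) occ) a = pvFF occ (pvFF occ a - 1) :=
      pvFF_insert_eq occ rfl
    have h2b : pvFF (insert (pvFF occ a) occ) b = pvFF occ (pvFF occ a - 1) :=
      pvFF_insert_eq occ hvv
    by_cases h0 : pvFF occ a = 0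
    · simp [pvStep, hvv, h0]
    · simp only [pvStep, hvv, if_neg h0, Option.bind_some]
      rw [h2a, h2b]

theorem pvDiamond (occ : Finset Int) (a b : Int) :
    ((pvStep occ a).bind (fun o => pvStep o b)) = ((pvStep occ b).bind (fun o => pvStep o a)) := by
  rcases le_total b a with h | h
  · exact pvDiamondLe occ h
  · exact (pvDiamondLe occ h).symm

theorem pvRun_nil (s : Option (Finset Int)) : pvRun [] s = s := rfl

theorem pvRun_cons (c : Int) (l : List Int) (s : Option (Finset Int)) :
    pvRun (c :: l) s = pvRun l (s.bind (fun occ => pvStep occ c)) := rfl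

theorem pvRun_append (l₁ l₂ : List Int) (s : Option (Finset Int)) :
    pvRun (l₁ ++ l₂) s = pvRun l₂ (pvRun l₁ s) := by
  simp [pvRun, List.foldl_append]

theorem pvRun_none (l : List Int) : pvRun l none = none := by
  induction l with
  | nil => rfl
  | cons c t ih => rw [pvRun_cons]; exact ih

theorem pvRun_perm {l₁ l₂ : List Int} (h : l₁.Perm l₂) (s : Option (Finset Int)) :
    pvRun l₁ s = pvRun l₂ s := by
  induction h generalizing s with
  | nil => rfl
  | cons x _ ih => rw [pvRun_cons, pvRun_cons, ih]
  | swap x y l => 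
    rw [pvRun_cons, pvRun_cons, pvRun_cons, pvRun_cons]
    congr 1
    cases s with
    | none => rfl
    | some occ => exact pvDiamond occ y x
  | trans _ _ ih₁ ih₂ => rw [ih₁, ih₂]

-- relating A's pointer-descent loops to the model's pvFF

theorem pass1Skip_none {mem : PySem.Dict Int Int} {v : Int} (h : pass1Skip mem v = none) :
    1 ≤ v ∧ ∀ w, 1 ≤ w → w ≤ v → mem.contains w = true := by
  induction v using pass1Skip.induct mem with
  | case1 v hc hz =>
    constructor
    · omega
    · intro w h1 h2
      have : w = v := by omega
      rwa [this]
  | case2 v hc hz ih =>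
    rw [pass1Skip] at h
    simp only [hc, dif_pos, if_neg hz] at h
    obtain ⟨ih1, ih2⟩ := ih h
    refine ⟨by omega, fun w h1 h2 => ?_⟩
    rcases eq_or_lt_of_le h2 with rfl | hlt
    · exact hc
    · exact ih2 w h1 (by omega)
  | case3 v hc =>
    rw [pass1Skip] at h
    simp [hc] at h

theorem pass1Skip_some {mem : PySem.Dict Int Int} {v u : Int} (h : pass1Skip mem v = some u) :
    mem.contains u = false ∧ u ≤ v ∧ ∀ w, u < w → w ≤ v → mem.contains w = true := by
  induction v using pass1Skip.induct mem with
  | case1 v hc hz =>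
    rw [pass1Skip] at h
    simp [hc, hz] at h
  | case2 v hc hz ih =>
    rw [pass1Skip] at h
    simp only [hc, dif_pos, if_neg hz] at h
    obtain ⟨ih1, ih2, ih3⟩ := ih h
    refine ⟨ih1, by omega, fun w h1 h2 => ?_⟩
    rcases eq_or_lt_of_le h2 with rfl | hlt
    · exact hc
    · exact ih3 w h1 (by omega)
  | case3 v hc =>
    rw [pass1Skip, dif_neg hc] at h
    injection h with h
    subst h
    exact ⟨by simpa using hc, le_refl _, fun w h1 h2 => by omega⟩

theorem pass2Skip_eq_pvFF {mem : PySem.Dict Int Int} {occ : Finset Int}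
    (hk : ∀ w, mem.contains w = true ↔ w ∈ occ) (v : Int) :
    pass2Skip mem v = pvFF occ v := by
  induction v using pass2Skip.induct mem with
  | case1 v hc ih =>
    rw [pass2Skip]
    simp only [hc, dif_pos]
    rw [ih, pvFF_mem ((hk v).mp hc)]
  | case2 v hc =>
    rw [pass2Skip]
    simp only [hc]
    rw [pvFF_notmem (fun hm => by simp [(hk v).mpr hm] at hc)]
    simp

-- running the model over a list of fresh distinct caps (A's reservations) just inserts them

theorem pvRun_fresh : ∀ (d : List Int) (occ : Finset Int), d.Nodup → ((0:Int) ∉ d) →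
    (∀ c ∈ d, c ∉ occ) →
    ∃ occ', pvRun d (some occ) = some occ' ∧ (∀ x, x ∈ occ' ↔ x ∈ d ∨ x ∈ occ) ∧
      occ'.sum id = occ.sum id + d.sum := by
  intro d
  induction d with
  | nil => exact fun occ _ _ _ => ⟨occ, rfl, by simp, by simp⟩
  | cons c t ih =>
    intro occ hnd h0 hfresh
    have hcocc : c ∉ occ := hfresh c List.mem_cons_self
    have hffc : pvFF occ c = c := pvFF_notmem hcocc
    have hc0 : c ≠ 0 := fun h => h0 (h ▸ List.mem_cons_self)
    rw [pvRun_cons]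
    have hstep : (some occ).bind (fun occ => pvStep occ c) = some (insert c occ) := by
      simp [pvStep, hffc, hc0]
    rw [hstep]
    obtain ⟨occ', h1, h2, h3⟩ := ih (insert c occ) hnd.of_cons
      (fun h => h0 (List.mem_cons_of_mem _ h))
      (fun x hx => by
        simp only [Finset.mem_insert]
        push_neg
        exact ⟨fun he => (List.nodup_cons.mp hnd).1 (he ▸ hx), hfresh x (List.mem_cons_of_mem _ hx)⟩)
    refine ⟨occ', h1, fun x => ?_, ?_⟩
    · rw [h2 x]
      simp only [Finset.mem_insert, List.mem_cons]
      tauto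
    · rw [h3, Finset.sum_insert hcocc]
      simp only [id, List.sum_cons]
      ring

-- counting elements of a flatMap of replicates over distinct keys

theorem pvCountFlat : ∀ (ks : List Int) (f : Int → Nat) (x : Int), ks.Nodup →
    (ks.flatMap (fun k => List.replicate (f k) k)).count x = if x ∈ ks then f x else 0 := by
  intro ks
  induction ks with
  | nil => simp
  | cons k t ih =>
    intro f x hnd
    rw [List.flatMap_cons, List.count_append, List.count_replicate, ih f x hnd.of_cons]
    by_cases hxk : x = k
    · subst hxk
      have hxt : x ∉ t := (List.nodup_cons.mp hnd).1
      simp [hxt]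
    · simp only [List.mem_cons]
      by_cases hxt : x ∈ t
      · simp [hxt, hxk, Ne.symm hxk]
      · simp [hxt, hxk, Ne.symm hxk]

-- if some cap g is duplicated and every height in [1, g) is present, the model fails

theorem pvRun_none_of_witness {l : List Int} (h0 : (0:Int) ∉ l) {g : Int} (hg1 : 1 ≤ g)
    (hgdup : 2 ≤ l.count g) (hbelow : ∀ w, 1 ≤ w → w < g → w ∈ l) :
    pvRun l (some ∅) = none := by
  have hperm1 : l.Perm (PySem.List.dedup l ++ l.diff (PySem.List.dedup l)) := by
    rw [List.perm_iff_count]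
    intro x
    rw [List.count_append, List.count_diff]
    have hnd : (PySem.List.dedup l).Nodup := PySem.List.nodup_dedup l
    by_cases hx : x ∈ l
    · have hmem : x ∈ PySem.List.dedup l := (PySem.List.mem_dedup l x).mpr hx
      have h1 : (PySem.List.dedup l).count x = 1 := List.count_eq_one_of_mem hnd hmem
      have h2 : 1 ≤ l.count x := List.one_le_count_iff.mpr hx
      omega
    · have h1 : (PySem.List.dedup l).count x = 0 :=
        List.count_eq_zero.mpr (fun hm => hx ((PySem.List.mem_dedup l x).mp hm))
      have h2 : l.count x = 0 := List.count_eq_zero.mpr hx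
      omega
  have hgl : g ∈ l := List.one_le_count_iff.mp (by omega)
  have hgrest : g ∈ l.diff (PySem.List.dedup l) := by
    apply List.one_le_count_iff.mp
    rw [List.count_diff]
    have : (PySem.List.dedup l).count g = 1 :=
      List.count_eq_one_of_mem (PySem.List.nodup_dedup l) ((PySem.List.mem_dedup l g).mpr hgl)
    omega
  have hperm2 : (l.diff (PySem.List.dedup l)).Perm
      (g :: (l.diff (PySem.List.dedup l)).erase g) := List.perm_cons_erase hgrest
  rw [pvRun_perm hperm1, pvRun_append]
  obtain ⟨occ', h1, h2, _⟩ := pvRun_fresh (PySem.List.dedup l) ∅ (PySem.List.nodup_dedup l)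
    (fun hm => h0 ((PySem.List.mem_dedup l 0).mp hm)) (by simp)
  rw [h1, pvRun_perm hperm2, pvRun_cons]
  have h0occ : (0:Int) ∉ occ' := fun hm => by
    rcases (h2 0).mp hm with hm | hm
    · exact h0 ((PySem.List.mem_dedup l 0).mp hm)
    · simp at hm
  have hffg : pvFF occ' g = 0 := by
    apply pvFF_zero occ' g (by omega) _ h0occ
    intro w hw1 hw2
    rcases eq_or_lt_of_le hw2 with rfl | hlt
    · exact (h2 w).mpr (Or.inl ((PySem.List.mem_dedup l w).mpr hgl))
    · exact (h2 w).mpr (Or.inl ((PySem.List.mem_dedup l w).mpr (hbelow w hw1 hlt)))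
  have : (some occ').bind (fun occ => pvStep occ g) = none := by
    simp [pvStep, hffg]
  rw [this, pvRun_none]

-- B's pass over the sorted-descending list follows the model step by step

theorem altGo_sim : ∀ (l : List Int) (occ : Finset Int) (res prev : Int),
    l.Pairwise (fun a b : Int => b ≤ a) →
    (∀ w ∈ occ, prev ≤ w) →
    (∀ c ∈ l, ∀ w, prev ≤ w → w ≤ c → w ∈ occ) →
    res = occ.sum id →
    altGo l res (some prev) = pvOut (pvRun l (some occ)) := by
  intro l
  induction l with
  | nil => intro occ res prev _ _ _ hres; simpa [altGo, pvOut] using hres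
  | cons c t ih =>
    intro occ res prev hsort hocc hint hres
    have hhead : ∀ c' ∈ t, c' ≤ c := fun c' hc' => (List.pairwise_cons.mp hsort).1 c' hc'
    have htail : t.Pairwise (fun a b : Int => b ≤ a) := (List.pairwise_cons.mp hsort).2
    have hff : pvFF occ c = min c (prev - 1) := by
      by_cases hc : c < prev
      · rw [pvFF_notmem (fun hm => by have := hocc c hm; omega)]
        omega
      · push_neg at hc
        have hiv : pvFF occ c = pvFF occ (prev - 1) := by
          apply pvFF_congr_interval occ (by omega)
          intro w hw1 hw2
          exact hint c List.mem_cons_self w (by omega) hw2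
        rw [hiv, pvFF_notmem (fun hm => by have := hocc _ hm; omega)]
        omega
    show (if min c (prev - 1) = 0 then -1
          else altGo t (res + min c (prev - 1)) (some (min c (prev - 1)))) = _
    by_cases hz : min c (prev - 1) = 0
    · have : (some occ).bind (fun occ => pvStep occ c) = none := by
        simp [pvStep, hff, hz]
      rw [if_pos hz, pvRun_cons, this, pvRun_none]
      rfl
    · rw [if_neg hz, pvRun_cons]
      have hstep : (some occ).bind (fun occ => pvStep occ c) =
          some (insert (min c (prev - 1)) occ) := by
        simp [pvStep, hff, hz]
      rw [hstep]
      have hfresh : min c (prev - 1) ∉ occ := hff ▸ pvFF_fresh occ c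
      apply ih _ _ _ htail
      · intro w hw
        rcases Finset.mem_insert.mp hw with rfl | hw
        · exact le_refl _
        · have := hocc w hw
          omega
      · intro c' hc' w hw1 hw2
        have hcc : c' ≤ c := hhead c' hc'
        rcases eq_or_lt_of_le hw1 with rfl | hw1'
        · exact Finset.mem_insert_self _ _
        · apply Finset.mem_insert_of_mem
          by_cases hwp : prev ≤ w
          · exact hint c List.mem_cons_self w hwp (by omega)
          · exfalso; omega
      · rw [Finset.sum_insert hfresh, hres]
        simp only [id]
        ring

theorem B_eq (l : List Int) :
    maximumTotalSum2_alt l = pvOut (pvRun (PySem.List.sorted l (fun x => x) true) (some ∅)) := by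
  unfold maximumTotalSum2_alt
  have hpw : (PySem.List.sorted l (fun x => x) true).Pairwise (fun a b : Int => b ≤ a) := by
    have := PySem.List.sorted_pairwise_rev (xs := l) (key := fun x : Int => x)
    simpa using this
  cases hs : PySem.List.sorted l (fun x => x) true with
  | nil => simp [hs, altGo, pvRun_nil, pvOut]
  | cons c t =>
    rw [hs] at hpw
    show (if c = 0 then -1 else altGo t (0 + c) (some c)) = _
    have hffc : pvFF ∅ c = c := pvFF_notmem (by simp)
    by_cases hc0 : c = 0
    · have : (some (∅ : Finset Int)).bind (fun occ => pvStep occ c) = none := by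
        subst hc0
        simp [pvStep, hffc]
      rw [if_pos hc0, pvRun_cons, this, pvRun_none]
      rfl
    · have hstep : (some (∅ : Finset Int)).bind (fun occ => pvStep occ c) =
          some ({c} : Finset Int) := by
        simp [pvStep, hffc, hc0]
      rw [if_neg hc0, pvRun_cons, hstep]
      apply altGo_sim t ({c} : Finset Int) (0 + c) c (List.pairwise_cons.mp hpw).2
      · intro w hw
        simp at hw
        omega
      · intro c' hc' w hw1 hw2
        have : c' ≤ c := (List.pairwise_cons.mp hpw).1 c' hc'
        simp
        omega
      · simp

-- invariant carried through A's first pass: keys = heights seen so far, and for each key h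
-- everything strictly between mem[h] and h is itself a key

def MemInv (mem : PySem.Dict Int Int) (S : List Int) : Prop :=
  (∀ v : Int, mem.contains v = true ↔ v ∈ S) ∧
  (∀ h : Int, mem.contains h = true →
     mem.getD h 0 < h ∧ ∀ w, mem.getD h 0 < w → w < h → mem.contains w = true)

theorem pass1_spec : ∀ (t : List Int) (counts mem : PySem.Dict Int Int) (seen : List Int),
    MemInv mem seen → (0:Int) ∉ seen → (0:Int) ∉ t →
    (match pass1 t counts mem with
     | none => ∃ g, 1 ≤ g ∧ 2 ≤ (seen ++ t).count g ∧ ∀ w, 1 ≤ w → w < g → w ∈ seen ++ t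
     | some cm => cm.1 = t.foldl (fun d x => d.modify x 0 (· + 1)) counts ∧
         MemInv cm.2 (seen ++ t)) := by
  intro t
  induction t with
  | nil =>
    intro counts mem seen hinv h0s h0t
    simpa [pass1] using hinv
  | cons h rest ih =>
    intro counts mem seen hinv h0s h0t
    have hh0 : h ≠ 0 := fun he => h0t (he ▸ List.mem_cons_self)
    have h0rest : (0:Int) ∉ rest := fun hm => h0t (List.mem_cons_of_mem _ hm)
    have happ : (seen ++ [h]) ++ rest = seen ++ h :: rest := by
      rw [List.append_assoc]; rfl
    by_cases hc : mem.contains h = true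
    · cases hskip : pass1Skip mem (mem.getD h 0) with
      | none =>
        have hg : pass1 (h :: rest) counts mem = none := by
          rw [pass1]
          simp only [hc, if_true, hskip]
        rw [hg]
        obtain ⟨hv1, hall⟩ := pass1Skip_none hskip
        obtain ⟨hlt, hintv⟩ := hinv.2 h hc
        refine ⟨h, by omega, ?_, ?_⟩
        · have hseen : h ∈ seen := (hinv.1 h).mp hc
          have h1 : 1 ≤ seen.count h := List.one_le_count_iff.mpr hseen
          rw [List.count_append, List.count_cons_self]
          omega
        · intro w hw1 hw2
          rw [List.mem_append]
          left
          by_cases hwv : w ≤ mem.getD h 0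
          · exact (hinv.1 w).mp (hall w hw1 hwv)
          · exact (hinv.1 w).mp (hintv w (by omega) hw2)
      | some u =>
        obtain ⟨hcu, hule, hskipint⟩ := pass1Skip_some hskip
        obtain ⟨hlt, hintv⟩ := hinv.2 h hc
        have hg : pass1 (h :: rest) counts mem =
            pass1 rest (counts.modify h 0 (· + 1)) (mem.insert h u) := by
          rw [pass1]
          simp only [hc, if_true, hskip]
        have hinv' : MemInv (mem.insert h u) (seen ++ [h]) := by
          constructor
          · intro v
            rw [PySem.Dict.contains_insert]
            simp only [List.mem_append, List.mem_singleton, Bool.or_eq_true, beq_iff_eq]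
            rw [hinv.1 v]
            tauto
          · intro g hg'
            rw [PySem.Dict.contains_insert] at hg'
            by_cases hgh : g = h
            · subst hgh
              rw [PySem.Dict.getD_insert, if_pos rfl]
              refine ⟨by omega, fun w hw1 hw2 => ?_⟩
              rw [PySem.Dict.contains_insert]
              by_cases hwv : w ≤ mem.getD g 0
              · rw [hskipint w hw1 hwv]; simp
              · rw [hintv w (by omega) hw2]; simp
            · have hcg : mem.contains g = true := by
                simp only [Bool.or_eq_true, beq_iff_eq] at hg'
                tauto
              obtain ⟨hlt2, hintv2⟩ := hinv.2 g hcg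
              rw [PySem.Dict.getD_insert, if_neg hgh]
              refine ⟨hlt2, fun w hw1 hw2 => ?_⟩
              rw [PySem.Dict.contains_insert, hintv2 w hw1 hw2]
              simp
        have h0s' : (0:Int) ∉ seen ++ [h] := by
          simp only [List.mem_append, List.mem_singleton]
          push_neg
          exact ⟨h0s, Ne.symm hh0⟩
        have := ih (counts.modify h 0 (· + 1)) (mem.insert h u) (seen ++ [h]) hinv' h0s' h0rest
        rw [happ] at this
        rw [hg]
        exact this
    · have hg : pass1 (h :: rest) counts mem =
          pass1 rest (counts.modify h 0 (· + 1)) (mem.insert h (h - 1)) := by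
        rw [pass1]
        simp only [hc]
        simp
      have hinv' : MemInv (mem.insert h (h - 1)) (seen ++ [h]) := by
        constructor
        · intro v
          rw [PySem.Dict.contains_insert]
          simp only [List.mem_append, List.mem_singleton, Bool.or_eq_true, beq_iff_eq]
          rw [hinv.1 v]
          tauto
        · intro g hg'
          rw [PySem.Dict.contains_insert] at hg'
          by_cases hgh : g = h
          · subst hgh
            rw [PySem.Dict.getD_insert, if_pos rfl]
            exact ⟨by omega, fun w hw1 hw2 => by omega⟩
          · have hcg : mem.contains g = true := by
              simp only [Bool.or_eq_true, beq_iff_eq] at hg'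
              tauto
            obtain ⟨hlt2, hintv2⟩ := hinv.2 g hcg
            rw [PySem.Dict.getD_insert, if_neg hgh]
            refine ⟨hlt2, fun w hw1 hw2 => ?_⟩
            rw [PySem.Dict.contains_insert, hintv2 w hw1 hw2]
            simp
      have h0s' : (0:Int) ∉ seen ++ [h] := by
        simp only [List.mem_append, List.mem_singleton]
        push_neg
        exact ⟨h0s, Ne.symm hh0⟩
      have := ih (counts.modify h 0 (· + 1)) (mem.insert h (h - 1)) (seen ++ [h]) hinv' h0s' h0rest
      rw [happ] at this
      rw [hg]
      exact this

-- invariant carried through A's second pass, against the model state occ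

def Mem2Inv (mem : PySem.Dict Int Int) (occ : Finset Int) : Prop :=
  (∀ v : Int, mem.contains v = true ↔ v ∈ occ) ∧
  (∀ g : Int, mem.contains g = true →
     mem.getD g 0 < g ∧ ∀ w, mem.getD g 0 < w → w ≤ g → w ∈ occ)

theorem chain_sim : ∀ (n : Nat) (cnt : Int), cnt.toNat = n →
    ∀ (mem : PySem.Dict Int Int) (h res : Int) (occ : Finset Int),
    Mem2Inv mem occ → ((0:Int) ∉ occ) → mem.contains h = true →
    (match pass2Chain mem h cnt res, pvRun (List.replicate (cnt - 1).toNat h) (some occ) with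
     | none, none => True
     | some p, some occ' => Mem2Inv p.1 occ' ∧ ((0:Int) ∉ occ') ∧
         p.2 = res + (occ'.sum id - occ.sum id) ∧ (∀ v ∈ occ, v ∈ occ')
     | _, _ => False) := by
  intro n
  induction n with
  | zero =>
    intro cnt hcnt mem h res occ hinv h0 hh
    have hc : ¬ (1 < cnt) := by omega
    have hrep : (cnt - 1).toNat = 0 := by omega
    rw [pass2Chain, dif_neg hc, hrep]
    simp only [List.replicate_zero, pvRun_nil]
    exact ⟨hinv, h0, by ring, fun v hv => hv⟩
  | succ n ihn =>
    intro cnt hcnt mem h res occ hinv h0 hh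
    by_cases hc : 1 < cnt
    · have hgetd := hinv.2 h hh
      have hhocc : h ∈ occ := hgetd.2 h (by omega) (le_refl _)
      have hskip : pass2Skip mem (mem.getD h 0) = pvFF occ h := by
        rw [pass2Skip_eq_pvFF hinv.1]
        exact (pvFF_congr_interval occ (by omega) (fun w hw1 hw2 => hgetd.2 w hw1 hw2)).symm
      have hrep : (cnt - 1).toNat = (cnt - 2).toNat + 1 := by omega
      rw [pass2Chain, dif_pos hc]
      simp only [hskip]
      rw [hrep, List.replicate_succ, pvRun_cons]
      by_cases hz : pvFF occ h = 0
      · rw [if_pos hz]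
        have : (some occ).bind (fun occ => pvStep occ h) = none := by
          simp [pvStep, hz]
        rw [this, pvRun_none]
        trivial
      · rw [if_neg hz]
        have hvle : pvFF occ h ≤ h := pvFF_le occ h
        have hvfresh : pvFF occ h ∉ occ := pvFF_fresh occ h
        have hvne : pvFF occ h ≠ h := fun he => hvfresh (by rw [he]; exact hhocc)
        have hstep : (some occ).bind (fun occ => pvStep occ h) =
            some (insert (pvFF occ h) occ) := by
          simp [pvStep, hz]
        rw [hstep]
        have hinv' : Mem2Inv ((mem.insert h (pvFF occ h - 1)).insert (pvFF occ h)
            (pvFF occ h - 1)) (insert (pvFF occ h) occ) := by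
          constructor
          · intro v
            rw [PySem.Dict.contains_insert, PySem.Dict.contains_insert]
            simp only [Bool.or_eq_true, beq_iff_eq, Finset.mem_insert]
            rw [hinv.1 v]
            constructor
            · rintro (rfl | rfl | hv)
              · exact Or.inl rfl
              · exact Or.inr hhocc
              · exact Or.inr hv
            · rintro (rfl | hv)
              · exact Or.inl rfl
              · right; right; exact hv
          · intro g hg
            rw [PySem.Dict.getD_insert, PySem.Dict.getD_insert]
            by_cases hgv : g = pvFF occ h
            · subst hgv
              rw [if_pos rfl]
              refine ⟨by omega, fun w hw1 hw2 => ?_⟩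
              have : w = pvFF occ h := by omega
              rw [this]
              exact Finset.mem_insert_self _ _
            · rw [if_neg hgv]
              by_cases hgh : g = h
              · subst hgh
                rw [if_pos rfl]
                refine ⟨by omega, fun w hw1 hw2 => ?_⟩
                by_cases hwv : w = pvFF occ g
                · rw [hwv]; exact Finset.mem_insert_self _ _
                · apply Finset.mem_insert_of_mem
                  by_cases hwd : w ≤ mem.getD g 0
                  · have hffgd : pvFF occ g = pvFF occ (mem.getD g 0) :=
                      pvFF_congr_interval occ (by omega) hgetd.2
                    exact pvFF_skipped occ (mem.getD g 0) w (by omega) hwd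
                  · exact hgetd.2 w (by omega) hw2
              · rw [if_neg hgh]
                rw [PySem.Dict.contains_insert, PySem.Dict.contains_insert] at hg
                simp only [Bool.or_eq_true, beq_iff_eq] at hg
                have hcg : mem.contains g = true := by tauto
                obtain ⟨h1, h2⟩ := hinv.2 g hcg
                exact ⟨h1, fun w hw1 hw2 => Finset.mem_insert_of_mem (h2 w hw1 hw2)⟩
        have h0' : (0:Int) ∉ insert (pvFF occ h) occ := by
          simp only [Finset.mem_insert]
          push_neg
          exact ⟨Ne.symm hz, h0⟩
        have hh' : ((mem.insert h (pvFF occ h - 1)).insert (pvFF occ h)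
            (pvFF occ h - 1)).contains h = true := (hinv'.1 h).mpr
          (Finset.mem_insert_of_mem hhocc)
        have hrec := ihn (cnt - 1) (by omega) _ h (res + pvFF occ h) _ hinv' h0' hh'
        have hrep2 : (cnt - 1 - 1).toNat = (cnt - 2).toNat := by omega
        rw [hrep2] at hrec
        revert hrec
        cases hA : pass2Chain ((mem.insert h (pvFF occ h - 1)).insert (pvFF occ h)
            (pvFF occ h - 1)) h (cnt - 1) (res + pvFF occ h) with
        | none =>
          cases hB : pvRun (List.replicate (cnt - 2).toNat h)
              (some (insert (pvFF occ h) occ)) with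
          | none => intro _; trivial
          | some occf => intro hrec; exact absurd hrec (by simp)
        | some p =>
          cases hB : pvRun (List.replicate (cnt - 2).toNat h)
              (some (insert (pvFF occ h) occ)) with
          | none => intro hrec; exact absurd hrec (by simp)
          | some occf =>
            intro hrec
            obtain ⟨hi, hz2, hsum, hmono⟩ := hrec
            refine ⟨hi, hz2, ?_, fun v hv => hmono v (Finset.mem_insert_of_mem hv)⟩
            have hins : (insert (pvFF occ h) occ).sum id = occ.sum id + pvFF occ h := by
              rw [Finset.sum_insert hvfresh]
              simp only [id]
              ring
            rw [hsum, hins]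
            ring
    · have hrep : (cnt - 1).toNat = 0 := by omega
      rw [pass2Chain, dif_neg hc, hrep]
      simp only [List.replicate_zero, pvRun_nil]
      exact ⟨hinv, h0, by ring, fun v hv => hv⟩

theorem pass2_sim : ∀ (its : List (Int × Int)) (mem : PySem.Dict Int Int) (res : Int)
    (occ : Finset Int), Mem2Inv mem occ → ((0:Int) ∉ occ) →
    (∀ p ∈ its, mem.contains p.1 = true) →
    (match pass2 its mem res,
       pvRun (its.flatMap (fun p => List.replicate (p.2 - 1).toNat p.1)) (some occ) with
     | none, none => True
     | some r, some occ' => r = res + (its.map (fun p => p.1)).sum + (occ'.sum id - occ.sum id)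
     | _, _ => False) := by
  intro its
  induction its with
  | nil =>
    intro mem res occ _ _ _
    simp only [pass2, List.flatMap_nil, pvRun_nil]
    simp
  | cons p rest ih =>
    intro mem res occ hinv h0 hits
    obtain ⟨h, cnt⟩ := p
    have hh : mem.contains h = true := hits (h, cnt) List.mem_cons_self
    have hchain := chain_sim (cnt.toNat) cnt rfl mem h (res + h) occ hinv h0 hh
    have hsplit : pvRun (((h, cnt) :: rest).flatMap
          (fun p => List.replicate (p.2 - 1).toNat p.1)) (some occ)
        = pvRun (rest.flatMap (fun p => List.replicate (p.2 - 1).toNat p.1))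
            (pvRun (List.replicate (cnt - 1).toNat h) (some occ)) := by
      rw [List.flatMap_cons, pvRun_append]
    cases hA : pass2Chain mem h cnt (res + h) with
    | none =>
      have hp2 : pass2 ((h, cnt) :: rest) mem res = none := by
        simp only [pass2, hA]
      rw [hA] at hchain
      cases hB : pvRun (List.replicate (cnt - 1).toNat h) (some occ) with
      | none => rw [hp2, hsplit, hB, pvRun_none]; trivial
      | some occ1 => rw [hB] at hchain; exact (hchain : False).elim
    | some p1 =>
      have hp2 : pass2 ((h, cnt) :: rest) mem res = pass2 rest p1.1 p1.2 := by
        simp only [pass2, hA]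
      rw [hA] at hchain
      cases hB : pvRun (List.replicate (cnt - 1).toNat h) (some occ) with
      | none => rw [hB] at hchain; exact (hchain : False).elim
      | some occ1 =>
        rw [hB] at hchain
        have hchain' : Mem2Inv p1.1 occ1 ∧ ((0:Int) ∉ occ1) ∧
            p1.2 = res + h + (occ1.sum id - occ.sum id) ∧ (∀ v ∈ occ, v ∈ occ1) := hchain
        obtain ⟨hinv1, h01, hres1, hmono1⟩ := hchain'
        have hits1 : ∀ q ∈ rest, p1.1.contains q.1 = true := fun q hq =>
          (hinv1.1 q.1).mpr (hmono1 q.1 ((hinv.1 q.1).mp (hits q (List.mem_cons_of_mem _ hq))))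
        have hih := ih p1.1 p1.2 occ1 hinv1 h01 hits1
        rw [hp2, hsplit, hB]
        revert hih
        cases hC : pass2 rest p1.1 p1.2 with
        | none =>
          cases hD : pvRun (rest.flatMap (fun p => List.replicate (p.2 - 1).toNat p.1))
              (some occ1) with
          | none => intro _; trivial
          | some occf => intro hih; exact (hih : False).elim
        | some r =>
          cases hD : pvRun (rest.flatMap (fun p => List.replicate (p.2 - 1).toNat p.1))
              (some occ1) with
          | none => intro hih; exact (hih : False).elim
          | some occf =>
            intro hih
            have hih' : r = p1.2 + (List.map (fun p => p.1) rest).sum +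
                (occf.sum id - occ1.sum id) := hih
            show r = res + (List.map (fun p => p.1) ((h, cnt) :: rest)).sum +
              (occf.sum id - occ.sum id)
            simp only [List.map_cons, List.sum_cons]
            rw [hih', hres1]
            ring

-- A's branch on pass1, assembled against the model run over
-- "distinct heights in first-occurrence order, then the duplicates"

theorem A_eq {l : List Int} (h0 : (0:Int) ∉ l) :
    maximumTotalSum2 l = pvOut (pvRun (PySem.List.sorted l (fun x => x) true) (some ∅)) := by
  have hpermsort : (PySem.List.sorted l (fun x => x) true).Perm l :=
    PySem.List.sorted_perm l (fun x => x) true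
  have hempty : MemInv PySem.Dict.empty [] := by
    constructor
    · intro v
      simp [PySem.Dict.contains_empty]
    · intro h hc
      rw [PySem.Dict.contains_empty] at hc
      exact absurd hc (by simp)
  have hspec := pass1_spec l PySem.Dict.empty PySem.Dict.empty [] hempty (by simp) h0
  unfold maximumTotalSum2
  cases hp : pass1 l PySem.Dict.empty PySem.Dict.empty with
  | none =>
    rw [hp] at hspec
    obtain ⟨g, hg1, hg2, hg3⟩ := hspec
    have hg2' : 2 ≤ l.count g := hg2
    have hg3' : ∀ w, 1 ≤ w → w < g → w ∈ l := hg3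
    rw [pvRun_perm hpermsort, pvRun_none_of_witness h0 hg1 hg2' hg3']
    rfl
  | some cm =>
    obtain ⟨counts, mem⟩ := cm
    rw [hp] at hspec
    obtain ⟨hcounts0, hmeminv0⟩ := hspec
    have hcounts : counts = l.foldl (fun d x => d.modify x 0 (· + 1)) PySem.Dict.empty :=
      hcounts0
    have hmeminv : MemInv mem l := hmeminv0
    have hcounter : counts = PySem.Dict.counter l := by
      rw [hcounts, PySem.Dict.counter_eq_foldl]
    have hitems : counts.items =
        (PySem.Set.ofList l).map (fun k => (k, (l.count k : Int))) := by
      rw [hcounter, PySem.Dict.items_counter]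
    -- the model's reservation phase over the distinct heights
    have hK0 : (0:Int) ∉ PySem.Set.ofList l := fun hm =>
      h0 ((PySem.Set.mem_ofList l 0).mp hm)
    obtain ⟨occ0, hrun0, hmem0, hsum0⟩ := pvRun_fresh (PySem.Set.ofList l) ∅
      (PySem.Set.nodup_ofList l) hK0 (by simp)
    have hocc0 : ∀ x : Int, x ∈ occ0 ↔ x ∈ l := by
      intro x
      rw [hmem0 x]
      simp [PySem.Set.mem_ofList]
    -- the full model order: distinct heights, then all duplicates
    have hpermpi : ((PySem.Set.ofList l) ++
        (counts.items.flatMap (fun p => List.replicate (p.2 - 1).toNat p.1))).Perm l := by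
      rw [hitems, List.flatMap_map]
      rw [List.perm_iff_count]
      intro x
      rw [List.count_append]
      have hflat := pvCountFlat (PySem.Set.ofList l)
        (fun k => (((l.count k : Int)) - 1).toNat) x (PySem.Set.nodup_ofList l)
      simp only at hflat
      rw [hflat]
      by_cases hx : x ∈ l
      · have hmem : x ∈ PySem.Set.ofList l := (PySem.Set.mem_ofList l x).mpr hx
        have h1 : (PySem.Set.ofList l).count x = 1 :=
          List.count_eq_one_of_mem (PySem.Set.nodup_ofList l) hmem
        have h2 : 1 ≤ l.count x := List.one_le_count_iff.mpr hx
        rw [h1, if_pos hmem]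
        omega
      · have h1 : (PySem.Set.ofList l).count x = 0 :=
          List.count_eq_zero.mpr (fun hm => hx ((PySem.Set.mem_ofList l x).mp hm))
        have h2 : l.count x = 0 := List.count_eq_zero.mpr hx
        rw [h1, if_neg (fun hm => hx ((PySem.Set.mem_ofList l x).mp hm))]
        omega
    rw [pvRun_perm hpermsort, pvRun_perm hpermpi.symm, pvRun_append, hrun0]
    -- second pass simulation
    have hinv2 : Mem2Inv mem occ0 := by
      constructor
      · intro v
        rw [(hmeminv.1 v), hocc0 v]
      · intro g hg
        obtain ⟨h1, h2⟩ := hmeminv.2 g hg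
        refine ⟨h1, fun w hw1 hw2 => ?_⟩
        rcases eq_or_lt_of_le hw2 with rfl | hlt
        · exact (hocc0 w).mpr ((hmeminv.1 w).mp hg)
        · exact (hocc0 w).mpr ((hmeminv.1 w).mp (h2 w hw1 hlt))
    have h00 : (0:Int) ∉ occ0 := fun hm => h0 ((hocc0 0).mp hm)
    have hits : ∀ p ∈ counts.items, mem.contains p.1 = true := by
      intro p hp'
      rw [hitems] at hp'
      obtain ⟨k, hk, rfl⟩ := List.mem_map.mp hp'
      exact (hmeminv.1 k).mpr ((PySem.Set.mem_ofList l k).mp hk)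
    have hsim := pass2_sim counts.items mem 0 occ0 hinv2 h00 hits
    have hkeysum : (counts.items.map (fun p => p.1)).sum = (PySem.Set.ofList l).sum := by
      rw [hitems, List.map_map]
      have hcomp : ((fun p : Int × Int => p.1) ∘ fun k : Int => (k, (l.count k : Int))) =
          fun k : Int => k := rfl
      rw [hcomp, List.map_id']
    have h0sum : occ0.sum id = (PySem.Set.ofList l).sum := by simpa using hsum0
    revert hsim
    cases hE : pass2 counts.items mem 0 with
    | none =>
      cases hF : pvRun (counts.items.flatMap (fun p => List.replicate (p.2 - 1).toNat p.1))
          (some occ0) with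
      | none =>
        intro _
        show (match pass2 counts.items mem 0 with
              | none => (-1 : Int) | some r => r) = _
        rw [hE]
        rfl
      | some occf => intro hsim; exact (hsim : False).elim
    | some r =>
      cases hF : pvRun (counts.items.flatMap (fun p => List.replicate (p.2 - 1).toNat p.1))
          (some occ0) with
      | none => intro hsim; exact (hsim : False).elim
      | some occf =>
        intro hsim
        have hsim' : r = 0 + (counts.items.map (fun p => p.1)).sum +
            (occf.sum id - occ0.sum id) := hsim
        show (match pass2 counts.items mem 0 with
              | none => (-1 : Int) | some r => r) = _
        rw [hE]
        show r = occf.sum id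
        rw [hsim', hkeysum]
        omega

-- ===== VERDICT (by name: the statement is the Claim_ definition above) =====
theorem maximumTotalSum2_spec : Claim_equal_maximumTotalSum2 := by
  intro l _ hpre
  unfold Spec_maximumTotalSum2
  rw [A_eq hpre, B_eq]
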